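-- pv_equiv track=rewrite | github.com/SpiritSeal/haunted-transcription-smle | assemble_v2.py | cap_polyphony_by_onset
-- ===== SOURCE A (Python) =====
-- def cap_polyphony_by_onset(notes, max_voices=4):
--     """At each onset 16th, keep the top max_voices by velocity."""
--     by_onset: dict[int, list] = {}
--     for n in notes:
--         by_onset.setdefault(n[0], []).append(n)
--     out = []
--     for s, bucket in by_onset.items():
--         bucket.sort(key=lambda x: (-x[3], x[2]))
--         out.extend(bucket[:max_voices])
--     return sorted(out, key=lambda x: (x[0], x[2]))
-- ===== SOURCE B (Python) =====
-- def cap_polyphony_by_onset(notes, max_voices=4):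
--     """At each onset 16th, keep the top max_voices by velocity."""
--     s = sorted(notes, key=lambda x: (-x[3], x[2]))
--     s.sort(key=lambda x: x[0])  # stable, so s is ordered by onset, then (-velocity, x[2])
--     out = []
--     i, n = 0, len(s)
--     while i < n:
--         j = i + 1
--         while j < n and s[j][0] == s[i][0]:
--             j += 1
--         out += s[i:j][:max_voices]
--         i = j
--     return sorted(out, key=lambda x: (x[0], x[2]))
-- ===== Notes on version B (the rewrite author's own statement) =====
-- stated objective: alternative
-- what changed: Replaces A's dict-of-buckets with per-bucket sorting by one global stable sort (secondary key pass then key=x[0]) followed by a single linear pass that slices each equal-onset run to max_voices, then the same final sort.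
import Mathlib
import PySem

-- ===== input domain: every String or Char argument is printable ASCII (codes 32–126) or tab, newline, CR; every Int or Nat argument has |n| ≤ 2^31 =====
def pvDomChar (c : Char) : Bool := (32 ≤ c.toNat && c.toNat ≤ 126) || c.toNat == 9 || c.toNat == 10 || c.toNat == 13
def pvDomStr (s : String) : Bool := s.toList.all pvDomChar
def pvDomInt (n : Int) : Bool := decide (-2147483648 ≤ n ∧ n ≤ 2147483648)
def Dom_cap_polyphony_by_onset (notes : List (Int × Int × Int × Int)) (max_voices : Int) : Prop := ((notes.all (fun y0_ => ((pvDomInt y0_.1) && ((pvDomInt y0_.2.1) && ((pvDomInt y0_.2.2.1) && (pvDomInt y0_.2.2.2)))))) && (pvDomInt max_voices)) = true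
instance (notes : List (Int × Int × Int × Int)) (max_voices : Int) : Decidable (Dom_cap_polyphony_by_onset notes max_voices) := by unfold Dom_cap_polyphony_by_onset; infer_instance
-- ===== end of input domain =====

-- B replaces A's dict-of-buckets + per-bucket sorting by one global stable sort followed by a
-- single linear grouping pass (objective: alternative decomposition; same exact output).

-- ===== PORT A =====
-- A note is the 4-tuple (x[0], x[1], x[2], x[3]) = (x.1, x.2.1, x.2.2.1, x.2.2.2).
-- 'by_onset.setdefault(n[0], []).append(n)' mutates the stored bucket in place; functionally this
-- is exactly d[n[0]] = d.get(n[0], []) + [n], i.e. Dict.modify (exact).  'bucket.sort(key=...)'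
-- sorts the bucket in place just before it is consumed, hence PySem.List.sorted2 of the bucket.
def cap_polyphony_by_onset (notes : List (Int × Int × Int × Int)) (max_voices : Int) : List (Int × Int × Int × Int) :=
  let by_onset : PySem.Dict Int (List (Int × Int × Int × Int)) :=
    notes.foldl (fun d n => d.modify n.1 [] (fun b => b ++ [n])) PySem.Dict.empty
  let out : List (Int × Int × Int × Int) :=
    by_onset.items.foldl
      (fun out p =>
        out ++ PySem.List.slice (PySem.List.sorted2 p.2 (fun x => -x.2.2.2) (fun x => x.2.2.1)) none (some max_voices))
      []
  PySem.List.sorted2 out (fun x => x.1) (fun x => x.2.2.1)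

-- ===== PORT B =====
-- The 'while i < n' loop of Source B: the inner 'while j' scan takes the leading run of equal onset
-- (takeWhile), appends run[:max_voices], and continues right after the run (dropWhile).
def pvCapRuns (max_voices : Int) : List (Int × Int × Int × Int) → List (Int × Int × Int × Int)
  | [] => []
  | x :: rest =>
    PySem.List.slice (x :: rest.takeWhile (fun y => y.1 == x.1)) none (some max_voices)
      ++ pvCapRuns max_voices (rest.dropWhile (fun y => y.1 == x.1))
termination_by l => l.length
decreasing_by
  simpa using Nat.lt_succ_of_le (List.length_dropWhile_le (fun y => y.1 == x.1) rest)

-- s = sorted(notes, key=(-x[3], x[2])); s.sort(key=x[0]) (stable); the run loop; the final sort.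
def cap_polyphony_by_onset_alt (notes : List (Int × Int × Int × Int)) (max_voices : Int) : List (Int × Int × Int × Int) :=
  let s1 := PySem.List.sorted2 notes (fun x => -x.2.2.2) (fun x => x.2.2.1)
  let s := PySem.List.sorted s1 (fun x => x.1)
  PySem.List.sorted2 (pvCapRuns max_voices s) (fun x => x.1) (fun x => x.2.2.1)

-- ===== PRECONDITION & SPEC =====
def Spec_cap_polyphony_by_onset (notes : List (Int × Int × Int × Int)) (max_voices : Int) (out : List (Int × Int × Int × Int)) : Prop := out = cap_polyphony_by_onset_alt notes max_voices
instance (notes : List (Int × Int × Int × Int)) (max_voices : Int) (out : List (Int × Int × Int × Int)) : Decidable (Spec_cap_polyphony_by_onset notes max_voices out) := by unfold Spec_cap_polyphony_by_onset; infer_instance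

-- ===== CLAIM (what is proved, stated in full; the proofs are below) =====
def Claim_equal_cap_polyphony_by_onset : Prop := ∀ (notes : List (Int × Int × Int × Int)) (max_voices : Int), Dom_cap_polyphony_by_onset notes max_voices → Spec_cap_polyphony_by_onset notes max_voices (cap_polyphony_by_onset notes max_voices)

-- ===== LEMMAS AND PROOFS =====

-- proof-side abbreviations: pvE2/pvE3 encode the tuple sort keys into one Int (lexicographic on
-- the Dom-bounded range), pvGrp/pvBlk are the per-onset bucket and its capped top slice.
def pvBnd (x : Int × Int × Int × Int) : Prop :=
  (-2147483648 ≤ x.1 ∧ x.1 ≤ 2147483648) ∧ (-2147483648 ≤ x.2.2.1 ∧ x.2.2.1 ≤ 2147483648) ∧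
  (-2147483648 ≤ x.2.2.2 ∧ x.2.2.2 ≤ 2147483648)

def pvE2 (x : Int × Int × Int × Int) : Int := x.1 * 8589934592 + x.2.2.1

def pvE3 (x : Int × Int × Int × Int) : Int := (-x.2.2.2) * 8589934592 + x.2.2.1

def pvGrp (notes : List (Int × Int × Int × Int)) (o : Int) : List (Int × Int × Int × Int) :=
  notes.filter (fun x => x.1 == o)

def pvBlk (notes : List (Int × Int × Int × Int)) (mv o : Int) : List (Int × Int × Int × Int) :=
  PySem.List.slice (PySem.List.sorted2 (pvGrp notes o) (fun x => -x.2.2.2) (fun x => x.2.2.1)) none (some mv)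

lemma pv_insertBy_append {α : Type} (b : α → α → Bool) (x : α) (p q : List α)
    (h : ∀ y ∈ p, b x y = false) :
    PySem.List.insertBy b x (p ++ q) = p ++ PySem.List.insertBy b x q := by
  induction p with
  | nil => simp
  | cons a p ih =>
    have ha := h a (by simp)
    simp [PySem.List.insertBy, ha, ih (fun y hy => h y (by simp [hy]))]

lemma pv_insertBy_all {α : Type} (b : α → α → Bool) (x : α) (q : List α)
    (h : ∀ y ∈ q, b x y = true) :
    PySem.List.insertBy b x q = x :: q := by
  cases q with
  | nil => simp [PySem.List.insertBy]
  | cons a q => simp [PySem.List.insertBy, h a (by simp)]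


lemma pv_sorted_groups {α : Type} (key : α → Int) (l : List α) (ks : List Int)
    (hks : ks.Pairwise (· < ·)) (hmem : ∀ x ∈ l, key x ∈ ks) :
    PySem.List.sorted l key false = ks.flatMap (fun c => l.filter (fun x => key x == c)) := by
  induction l using List.reverseRecOn with
  | nil => rw [PySem.List.sorted_eq_foldl_insertBy]; simp
  | append_singleton l x ih =>
    have hmem' : ∀ y ∈ l, key y ∈ ks := fun y hy => hmem y (by simp [hy])
    have step : PySem.List.sorted (l ++ [x]) key false
        = PySem.List.insertBy (fun a b => decide (key a < key b)) x (PySem.List.sorted l key false) := by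
      rw [PySem.List.sorted_eq_foldl_insertBy, PySem.List.sorted_eq_foldl_insertBy, List.foldl_append]
      simp
    rw [step, ih hmem']
    obtain ⟨u, v, huv⟩ := List.mem_iff_append.mp (hmem x (by simp))
    subst huv
    rw [List.pairwise_append] at hks
    obtain ⟨hu, hcv, hsplit⟩ := hks
    have hv_gt : ∀ b ∈ v, key x < b := (List.pairwise_cons.mp hcv).1
    have hu_lt : ∀ a ∈ u, a < key x := fun a ha => hsplit a ha (key x) (by simp)
    -- left side: insert x right after its own class
    rw [List.flatMap_append, List.flatMap_cons, ← List.append_assoc]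
    rw [pv_insertBy_append _ x _ _ (by
      intro y hy
      simp only [List.mem_append, List.mem_flatMap, List.mem_filter, beq_iff_eq] at hy
      rcases hy with ⟨c, hc, _, hkey⟩ | ⟨_, hkey⟩
      · have := hu_lt c hc; simp; omega
      · simp; omega)]
    rw [pv_insertBy_all _ x _ (by
      intro y hy
      simp only [List.mem_flatMap, List.mem_filter, beq_iff_eq] at hy
      obtain ⟨c, hc, _, hkey⟩ := hy
      have := hv_gt c hc; simp; omega)]
    -- right side: the new element lands at the end of its own class
    rw [List.flatMap_append, List.flatMap_cons]
    have hclass : ∀ (c : Int), (l ++ [x]).filter (fun y => key y == c)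
        = l.filter (fun y => key y == c) ++ (if key x = c then [x] else []) := by
      intro c; rw [List.filter_append]
      by_cases h : key x = c <;> simp [h]
    have hu_fm : List.flatMap (fun c => (l ++ [x]).filter (fun y => key y == c)) u
        = List.flatMap (fun c => l.filter (fun y => key y == c)) u :=
      List.flatMap_congr (fun c hc => by
        rw [hclass c]; have := hu_lt c hc; rw [if_neg (by omega)]; simp)
    have hv_fm : List.flatMap (fun c => (l ++ [x]).filter (fun y => key y == c)) v
        = List.flatMap (fun c => l.filter (fun y => key y == c)) v :=
      List.flatMap_congr (fun c hc => by
        rw [hclass c]; have := hv_gt c hc; rw [if_neg (by omega)]; simp)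
    rw [hu_fm, hv_fm, hclass (key x), if_pos rfl]
    simp

lemma pv_insertBy_congr {α : Type} (b₁ b₂ : α → α → Bool) (x : α) (acc : List α)
    (h : ∀ y ∈ acc, b₁ x y = b₂ x y) :
    PySem.List.insertBy b₁ x acc = PySem.List.insertBy b₂ x acc := by
  induction acc with
  | nil => rfl
  | cons a acc ih =>
    have ha := h a (by simp)
    simp only [PySem.List.insertBy, ← ha, ih (fun y hy => h y (by simp [hy]))]

lemma pv_foldl_insertBy_congr {α : Type} (b₁ b₂ : α → α → Bool) (l acc : List α)
    (h : ∀ x ∈ l, ∀ y, (y ∈ acc ∨ y ∈ l) → b₁ x y = b₂ x y) :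
    l.foldl (fun acc x => PySem.List.insertBy b₁ x acc) acc
      = l.foldl (fun acc x => PySem.List.insertBy b₂ x acc) acc := by
  induction l generalizing acc with
  | nil => rfl
  | cons a l ih =>
    simp only [List.foldl_cons]
    rw [pv_insertBy_congr b₁ b₂ a acc (fun y hy => h a (by simp) y (Or.inl hy))]
    exact ih _ (fun x hx y hy => h x (by simp [hx]) y (by
      rcases hy with hy | hy
      · rcases (PySem.List.mem_insertBy b₂ a y acc).mp hy with rfl | hy
        · exact Or.inr (by simp)
        · exact Or.inl hy
      · exact Or.inr (by simp [hy])))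

lemma pv_sorted2_eq_sorted {α : Type} (l : List α) (k1 k2 : α → Int) (e : α → Int)
    (h : ∀ a ∈ l, ∀ b ∈ l,
      (decide (k1 a < k1 b) || (!decide (k1 b < k1 a) && decide (k2 a < k2 b))) = decide (e a < e b)) :
    PySem.List.sorted2 l k1 k2 false = PySem.List.sorted l e false := by
  show l.foldl (fun acc x => PySem.List.insertBy _ x acc) [] = l.foldl (fun acc x => PySem.List.insertBy _ x acc) []
  exact pv_foldl_insertBy_congr _ _ l []
    (fun x hx y hy => by
      rcases hy with hy | hy
      · simp at hy
      · exact h x hx y hy)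

lemma pv_sorted_filter {α : Type} (l : List α) (key : α → Int) (p : α → Bool) :
    (PySem.List.sorted l key false).filter p = PySem.List.sorted (l.filter p) key false := by
  have hpw : (PySem.List.sorted (PySem.Set.ofList (l.map key)) (fun c => c) false).Pairwise (· < ·) :=
    PySem.List.sorted_ofList_pairwise_lt _
  have hm1 : ∀ x ∈ l, key x ∈ PySem.List.sorted (PySem.Set.ofList (l.map key)) (fun c => c) false := by
    intro x hx
    rw [PySem.List.mem_sorted, PySem.Set.mem_ofList]
    exact List.mem_map_of_mem hx
  rw [pv_sorted_groups key l _ hpw hm1,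
      pv_sorted_groups key (l.filter p) _ hpw (fun x hx => hm1 x (List.mem_of_mem_filter hx)),
      List.filter_flatMap]
  exact List.flatMap_congr (fun c _ => by
    rw [List.filter_filter, List.filter_filter]
    exact List.filter_congr (fun a _ => Bool.and_comm _ _))

lemma pv_flatMap_single {α : Type} (ks : List Int) (F : Int → List α) (o0 : Int)
    (hnd : ks.Nodup) (ho : o0 ∈ ks) (hz : ∀ o ∈ ks, o ≠ o0 → F o = []) :
    ks.flatMap F = F o0 := by
  induction ks with
  | nil => simp at ho
  | cons k rest ih =>
    rw [List.nodup_cons] at hnd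
    rw [List.flatMap_cons]
    rcases List.mem_cons.mp ho with rfl | ho'
    · have : ∀ o ∈ rest, F o = [] := fun o hro => hz o (by simp [hro]) (fun h => hnd.1 (h ▸ hro))
      simp [List.flatMap_eq_nil_iff.mpr this]
    · have hk : F k = [] := hz k (by simp) (fun h => hnd.1 (h ▸ ho'))
      rw [hk, List.nil_append]
      exact ih hnd.2 ho' (fun o hro hne => hz o (by simp [hro]) hne)

lemma pv_takeWhile_nil {α : Type} (p : α → Bool) (t : List α) (h : ∀ y ∈ t, p y = false) :
    t.takeWhile p = [] := by
  cases t with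
  | nil => rfl
  | cons a t => simp [h a (by simp)]

lemma pv_dropWhile_self {α : Type} (p : α → Bool) (t : List α) (h : ∀ y ∈ t, p y = false) :
    t.dropWhile p = t := by
  cases t with
  | nil => rfl
  | cons a t => simp [h a (by simp)]

lemma pv_capRuns_flatMap (mv : Int) (ks : List Int) (g : Int → List (Int × Int × Int × Int))
    (hnd : ks.Nodup) (ho : ∀ k ∈ ks, (∀ x ∈ g k, x.1 = k) ∧ g k ≠ []) :
    pvCapRuns mv (ks.flatMap g) = ks.flatMap (fun k => PySem.List.slice (g k) none (some mv)) := by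
  induction ks with
  | nil => simp [pvCapRuns]
  | cons k rest ih =>
    rw [List.nodup_cons] at hnd
    obtain ⟨hall, hne⟩ := ho k (by simp)
    obtain ⟨x, xs, hgx⟩ : ∃ x xs, g k = x :: xs := by
      cases h : g k with
      | nil => exact absurd h hne
      | cons a t => exact ⟨a, t, rfl⟩
    have hx1 : x.1 = k := hall x (by rw [hgx]; simp)
    have htail : ∀ y ∈ rest.flatMap g, (y.1 == x.1) = false := by
      intro y hy
      obtain ⟨k', hk', hyk⟩ := List.mem_flatMap.mp hy
      have : y.1 = k' := (ho k' (by simp [hk'])).1 y hyk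
      have hkk : k' ≠ k := fun h => hnd.1 (h ▸ hk')
      simp [this, hx1, hkk]
    have hxs : ∀ y ∈ xs, (y.1 == x.1) = true := by
      intro y hy
      have : y.1 = k := hall y (by rw [hgx]; simp [hy])
      simp [this, hx1]
    rw [List.flatMap_cons, hgx, List.cons_append, pvCapRuns]
    rw [List.takeWhile_append_of_pos hxs, pv_takeWhile_nil _ _ htail,
        List.dropWhile_append_of_pos hxs, pv_dropWhile_self _ _ htail]
    rw [ih hnd.2 (fun k' hk' => ho k' (by simp [hk']))]
    rw [List.flatMap_cons, hgx]
    simp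

lemma pv_e2_lex (a b : Int × Int × Int × Int) (ha : pvBnd a) (hb : pvBnd b) :
    (decide (a.1 < b.1) || (!decide (b.1 < a.1) && decide (a.2.2.1 < b.2.2.1))) = decide (pvE2 a < pvE2 b) := by
  obtain ⟨⟨ha1, ha2⟩, ⟨ha3, ha4⟩, ha5, ha6⟩ := ha
  obtain ⟨⟨hb1, hb2⟩, ⟨hb3, hb4⟩, hb5, hb6⟩ := hb
  have h : (pvE2 a < pvE2 b) ↔ (a.1 < b.1 ∨ (¬ (b.1 < a.1) ∧ a.2.2.1 < b.2.2.1)) := by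
    unfold pvE2; omega
  have hd : decide (pvE2 a < pvE2 b) = decide (a.1 < b.1 ∨ (¬ (b.1 < a.1) ∧ a.2.2.1 < b.2.2.1)) := decide_eq_decide.mpr h
  rw [hd]
  by_cases h1 : a.1 < b.1 <;> by_cases h2 : b.1 < a.1 <;> by_cases h3 : a.2.2.1 < b.2.2.1 <;> simp [h1, h2, h3]

lemma pv_e2_inj (a b : Int × Int × Int × Int) (ha : pvBnd a) (hb : pvBnd b)
    (h : pvE2 a = pvE2 b) : a.1 = b.1 := by
  obtain ⟨⟨ha1, ha2⟩, ⟨ha3, ha4⟩, ha5, ha6⟩ := ha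
  obtain ⟨⟨hb1, hb2⟩, ⟨hb3, hb4⟩, hb5, hb6⟩ := hb
  unfold pvE2 at h; omega

lemma pv_e3_lex (a b : Int × Int × Int × Int) (ha : pvBnd a) (hb : pvBnd b) :
    (decide (-a.2.2.2 < -b.2.2.2) || (!decide (-b.2.2.2 < -a.2.2.2) && decide (a.2.2.1 < b.2.2.1))) = decide (pvE3 a < pvE3 b) := by
  obtain ⟨⟨ha1, ha2⟩, ⟨ha3, ha4⟩, ha5, ha6⟩ := ha
  obtain ⟨⟨hb1, hb2⟩, ⟨hb3, hb4⟩, hb5, hb6⟩ := hb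
  have h : (pvE3 a < pvE3 b) ↔ (-a.2.2.2 < -b.2.2.2 ∨ (¬ (-b.2.2.2 < -a.2.2.2) ∧ a.2.2.1 < b.2.2.1)) := by
    unfold pvE3; omega
  have hd : decide (pvE3 a < pvE3 b) = decide (-a.2.2.2 < -b.2.2.2 ∨ (¬ (-b.2.2.2 < -a.2.2.2) ∧ a.2.2.1 < b.2.2.1)) := decide_eq_decide.mpr h
  rw [hd]
  by_cases h1 : -a.2.2.2 < -b.2.2.2 <;> by_cases h2 : -b.2.2.2 < -a.2.2.2 <;> by_cases h3 : a.2.2.1 < b.2.2.1 <;> simp [h1, h2, h3]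

lemma pv_mem_blk {notes : List (Int × Int × Int × Int)} {mv o : Int} {y : Int × Int × Int × Int}
    (h : y ∈ pvBlk notes mv o) : y ∈ notes ∧ y.1 = o := by
  unfold pvBlk at h
  have h1 := PySem.List.mem_of_mem_slice _ _ _ h
  have h2 := (PySem.List.sorted2_perm (pvGrp notes o) _ _ _).mem_iff.mp h1
  unfold pvGrp at h2
  have := List.mem_filter.mp h2
  exact ⟨this.1, by simpa using this.2⟩

lemma pv_A_char (notes : List (Int × Int × Int × Int)) (mv : Int) :
    cap_polyphony_by_onset notes mv
      = PySem.List.sorted2 ((PySem.Set.ofList (notes.map (fun x => x.1))).flatMap (pvBlk notes mv))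
          (fun x => x.1) (fun x => x.2.2.1) := by
  show PySem.List.sorted2
      ((notes.foldl (fun d n => d.modify n.1 [] (fun b => b ++ [n])) PySem.Dict.empty).items.foldl
        (fun out p =>
          out ++ PySem.List.slice (PySem.List.sorted2 p.2 (fun x => -x.2.2.2) (fun x => x.2.2.1)) none (some mv))
        [])
      (fun x => x.1) (fun x => x.2.2.1) = _
  have hD : (notes.foldl (fun d n => d.modify n.1 [] (fun b => b ++ [n])) PySem.Dict.empty)
      = (notes.map (fun n => (n.1, n))).foldl (fun d p => d.modify p.1 [] (fun b => b ++ [p.2])) PySem.Dict.empty := by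
    rw [List.foldl_map]
  have hkeys : (notes.foldl (fun d n => d.modify n.1 [] (fun b => b ++ [n])) PySem.Dict.empty).keys
      = PySem.Set.ofList (notes.map (fun x => x.1)) := by
    have h := PySem.Dict.keys_foldl_modify_key notes (fun n => n.1) ([] : List (Int × Int × Int × Int))
      (fun _ n => (fun b => b ++ [n])) PySem.Dict.empty
    simpa [PySem.Set.update, PySem.Set.ofList] using h
  have hgetD : ∀ o : Int,
      (notes.foldl (fun d n => d.modify n.1 [] (fun b => b ++ [n])) PySem.Dict.empty).getD o [] = pvGrp notes o := by
    intro o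
    rw [hD, PySem.Dict.getD_foldl_modify_append]
    simp [List.filter_map, Function.comp_def, pvGrp]
  have hitems := PySem.Dict.items_eq_map_keys
    (notes.foldl (fun d n => d.modify n.1 [] (fun b => b ++ [n])) PySem.Dict.empty)
    (by rw [hkeys]; exact PySem.Set.nodup_ofList _) ([] : List (Int × Int × Int × Int))
  rw [hitems, hkeys, PySem.List.foldl_append_eq_flatMap, List.nil_append, List.flatMap_map]
  congr 1
  exact List.flatMap_congr (fun o _ => by rw [hgetD o]; rfl)

lemma pv_B_char (notes : List (Int × Int × Int × Int)) (mv : Int) (hb : ∀ x ∈ notes, pvBnd x) :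
    cap_polyphony_by_onset_alt notes mv
      = PySem.List.sorted2
          ((PySem.List.sorted (PySem.Set.ofList ((PySem.List.sorted2 notes (fun x => -x.2.2.2) (fun x => x.2.2.1) false).map (fun x => x.1))) (fun c => c) false).flatMap (pvBlk notes mv))
          (fun x => x.1) (fun x => x.2.2.1) := by
  show PySem.List.sorted2
      (pvCapRuns mv (PySem.List.sorted (PySem.List.sorted2 notes (fun x => -x.2.2.2) (fun x => x.2.2.1) false) (fun x => x.1) false))
      (fun x => x.1) (fun x => x.2.2.1) = _
  have hperm := PySem.List.sorted2_perm notes (fun x => -x.2.2.2) (fun x => x.2.2.1) false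
  have hbs1 : ∀ x ∈ PySem.List.sorted2 notes (fun x => -x.2.2.2) (fun x => x.2.2.1) false, pvBnd x :=
    fun x hx => hb x (hperm.mem_iff.mp hx)
  -- the sorted2 pre-pass is the sort by the encoded key pvE3
  have hs1 : PySem.List.sorted2 notes (fun x => -x.2.2.2) (fun x => x.2.2.1) false
      = PySem.List.sorted notes pvE3 false :=
    pv_sorted2_eq_sorted notes _ _ pvE3 (fun a ha b hb' => pv_e3_lex a b (hb a ha) (hb b hb'))
  have hpw : (PySem.List.sorted (PySem.Set.ofList ((PySem.List.sorted2 notes (fun x => -x.2.2.2) (fun x => x.2.2.1) false).map (fun x => x.1))) (fun c => c) false).Pairwise (· < ·) :=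
    PySem.List.sorted_ofList_pairwise_lt _
  set ksA := PySem.List.sorted (PySem.Set.ofList ((PySem.List.sorted2 notes (fun x => -x.2.2.2) (fun x => x.2.2.1) false).map (fun x => x.1))) (fun c => c) false with hksA
  have hmemA : ∀ o : Int, o ∈ ksA ↔ ∃ z ∈ notes, z.1 = o := by
    intro o
    rw [hksA, PySem.List.mem_sorted, PySem.Set.mem_ofList, List.mem_map]
    constructor
    · rintro ⟨z, hz, rfl⟩; exact ⟨z, hperm.mem_iff.mp hz, rfl⟩
    · rintro ⟨z, hz, rfl⟩; exact ⟨z, hperm.mem_iff.mpr hz, rfl⟩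
  -- the stable onset sort groups by onset, each group = sorted2 of the bucket
  have hfil : ∀ o : Int,
      (PySem.List.sorted2 notes (fun x => -x.2.2.2) (fun x => x.2.2.1) false).filter (fun x => x.1 == o)
        = PySem.List.sorted2 (pvGrp notes o) (fun x => -x.2.2.2) (fun x => x.2.2.1) false := by
    intro o
    rw [hs1, pv_sorted_filter, ← pvGrp]
    exact (pv_sorted2_eq_sorted (pvGrp notes o) _ _ pvE3 (fun a ha b hb' =>
      pv_e3_lex a b (hb a (List.mem_of_mem_filter ha)) (hb b (List.mem_of_mem_filter hb')))).symm
  have hmems : ∀ x ∈ PySem.List.sorted2 notes (fun x => -x.2.2.2) (fun x => x.2.2.1) false,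
      (fun x : Int × Int × Int × Int => x.1) x ∈ ksA := by
    intro x hx
    rw [hksA, PySem.List.mem_sorted, PySem.Set.mem_ofList]
    exact List.mem_map_of_mem hx
  have hgrouped := pv_sorted_groups (fun x : Int × Int × Int × Int => x.1)
    (PySem.List.sorted2 notes (fun x => -x.2.2.2) (fun x => x.2.2.1) false) ksA hpw hmems
  rw [hgrouped, List.flatMap_congr (fun o _ => hfil o),
      pv_capRuns_flatMap mv ksA _ (hpw.imp (fun h => ne_of_lt h)) ?side]
  case side =>
    intro k hk
    constructor
    · intro x hx
      have := List.mem_filter.mp ((PySem.List.sorted2_perm (pvGrp notes k) _ _ _).mem_iff.mp hx)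
      simpa using this.2
    · obtain ⟨z, hz, rfl⟩ := (hmemA k).mp hk
      intro hnil
      have h0 := PySem.List.sorted2_perm (pvGrp notes z.1) (fun x => -x.2.2.2) (fun x => x.2.2.1) false
      rw [hnil] at h0
      have hg : pvGrp notes z.1 = [] := h0.symm.eq_nil
      have hzz : z ∈ pvGrp notes z.1 := List.mem_filter.mpr ⟨hz, by simp⟩
      rw [hg] at hzz; simp at hzz
  rfl

-- ===== VERDICT (by name: the statement is the Claim_ definition above) =====
theorem cap_polyphony_by_onset_spec : Claim_equal_cap_polyphony_by_onset := by
  intro notes mv hdom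
  unfold Spec_cap_polyphony_by_onset
  have hb : ∀ x ∈ notes, pvBnd x := by
    unfold Dom_cap_polyphony_by_onset pvDomInt at hdom
    simp only [Bool.and_eq_true, List.all_eq_true, decide_eq_true_eq] at hdom
    intro x hx
    obtain ⟨h1, h2, h3, h4⟩ := hdom.1 x hx
    exact ⟨h1, h3, h4⟩
  rw [pv_A_char, pv_B_char _ _ hb]
  set K := PySem.Set.ofList (notes.map (fun x => x.1)) with hK
  set ksA := PySem.List.sorted (PySem.Set.ofList ((PySem.List.sorted2 notes (fun x => -x.2.2.2) (fun x => x.2.2.1) false).map (fun x => x.1))) (fun c => c) false with hksA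
  have hperm := PySem.List.sorted2_perm notes (fun x => -x.2.2.2) (fun x => x.2.2.1) false
  have hKiff : ∀ o : Int, o ∈ K ↔ o ∈ ksA := by
    intro o
    rw [hK, hksA, PySem.List.mem_sorted, PySem.Set.mem_ofList, PySem.Set.mem_ofList,
        List.mem_map, List.mem_map]
    constructor
    · rintro ⟨z, hz, rfl⟩; exact ⟨z, hperm.mem_iff.mpr hz, rfl⟩
    · rintro ⟨z, hz, rfl⟩; exact ⟨z, hperm.mem_iff.mp hz, rfl⟩
  have hbA : ∀ x ∈ K.flatMap (pvBlk notes mv), pvBnd x := by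
    intro x hx
    obtain ⟨o, _, hxo⟩ := List.mem_flatMap.mp hx
    exact hb x (pv_mem_blk hxo).1
  have hbB : ∀ x ∈ ksA.flatMap (pvBlk notes mv), pvBnd x := by
    intro x hx
    obtain ⟨o, _, hxo⟩ := List.mem_flatMap.mp hx
    exact hb x (pv_mem_blk hxo).1
  rw [pv_sorted2_eq_sorted _ _ _ pvE2 (fun a ha b hb' => pv_e2_lex a b (hbA a ha) (hbA b hb')),
      pv_sorted2_eq_sorted _ _ _ pvE2 (fun a ha b hb' => pv_e2_lex a b (hbB a ha) (hbB b hb'))]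
  set ks2 := PySem.List.sorted (PySem.Set.ofList ((K.flatMap (pvBlk notes mv)).map pvE2)) (fun c => c) false with hks2
  have hpw2 : ks2.Pairwise (· < ·) := PySem.List.sorted_ofList_pairwise_lt _
  have hmA : ∀ x ∈ K.flatMap (pvBlk notes mv), pvE2 x ∈ ks2 := by
    intro x hx
    rw [hks2, PySem.List.mem_sorted, PySem.Set.mem_ofList]
    exact List.mem_map_of_mem hx
  have hmB : ∀ x ∈ ksA.flatMap (pvBlk notes mv), pvE2 x ∈ ks2 := by
    intro x hx
    obtain ⟨o, ho, hxo⟩ := List.mem_flatMap.mp hx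
    exact hmA x (List.mem_flatMap.mpr ⟨o, (hKiff o).mpr ho, hxo⟩)
  rw [pv_sorted_groups pvE2 _ ks2 hpw2 hmA, pv_sorted_groups pvE2 _ ks2 hpw2 hmB]
  apply List.flatMap_congr
  intro c hc
  have : c ∈ (K.flatMap (pvBlk notes mv)).map pvE2 := by
    rw [hks2, PySem.List.mem_sorted, PySem.Set.mem_ofList] at hc; exact hc
  obtain ⟨x0, hx0, rfl⟩ := List.mem_map.mp this
  obtain ⟨o0, ho0, hx0o⟩ := List.mem_flatMap.mp hx0
  obtain ⟨hx0n, hx0onset⟩ := pv_mem_blk hx0o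
  have hzero : ∀ o, o ≠ x0.1 → (pvBlk notes mv o).filter (fun x => pvE2 x == pvE2 x0) = [] := by
    intro o hne
    rw [List.filter_eq_nil_iff]
    intro y hy
    obtain ⟨hyn, hyo⟩ := pv_mem_blk hy
    simp only [beq_iff_eq]
    intro he
    exact hne (by rw [← hyo, pv_e2_inj y x0 (hb y hyn) (hb x0 hx0n) he])
  have ho0eq : o0 = x0.1 := hx0onset.symm
  rw [List.filter_flatMap, List.filter_flatMap]
  rw [pv_flatMap_single K _ x0.1 (PySem.Set.nodup_ofList _) (ho0eq ▸ ho0) (fun o _ => hzero o),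
      pv_flatMap_single ksA _ x0.1 ((PySem.List.sorted_ofList_pairwise_lt _).imp (fun h => ne_of_lt h)) ((hKiff x0.1).mp (ho0eq ▸ ho0)) (fun o _ => hzero o)]
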